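-- pv_equiv track=rewrite | github.com/garias1831/Code_Club | advent2022/day2/pt1.py | get_choice_score
-- ===== SOURCE A (Python) =====
-- def get_choice_score(choices):
--     choice_score = 0
--
--     for choice in choices:
--         if choice == 'X':
--             choice_score += 1
--         elif choice == 'Y':
--             choice_score += 2
--         elif choice == 'Z':
--             choice_score += 3
--     return choice_score
-- ===== SOURCE B (Python) =====
-- def get_choice_score(choices):
--     scores = {'X': 1, 'Y': 2, 'Z': 3}
--
--     def total(lo, hi):
--         if lo >= hi:
--             return 0
--         if hi - lo == 1:
--             return scores.get(choices[lo], 0)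
--         mid = (lo + hi) // 2
--         return total(lo, mid) + total(mid, hi)
--
--     return total(0, len(choices))
-- ===== Notes on version B (the rewrite author's own statement) =====
-- stated objective: alternative
-- what changed: Replaces the linear if/elif accumulator loop with a divide-and-conquer recursion over index ranges that halves the range, scores singleton ranges via a lookup table, and adds the two halves.
import Mathlib
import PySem

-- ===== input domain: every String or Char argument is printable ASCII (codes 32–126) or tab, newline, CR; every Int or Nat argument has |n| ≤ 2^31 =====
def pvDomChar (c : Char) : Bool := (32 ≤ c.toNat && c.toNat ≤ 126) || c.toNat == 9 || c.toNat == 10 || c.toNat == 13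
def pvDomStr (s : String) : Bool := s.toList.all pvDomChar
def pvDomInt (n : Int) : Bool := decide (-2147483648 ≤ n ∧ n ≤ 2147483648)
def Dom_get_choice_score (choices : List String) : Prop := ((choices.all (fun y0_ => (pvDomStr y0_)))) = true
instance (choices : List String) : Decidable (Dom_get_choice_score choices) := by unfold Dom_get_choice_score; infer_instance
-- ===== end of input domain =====

-- B replaces the linear if/elif accumulator loop with a divide-and-conquer recursion over index ranges plus a lookup table; alternative decomposition, same cost.

-- ===== PORT A =====
def get_choice_score (choices : List String) : Int :=
  choices.foldl
    (fun choice_score choice =>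
      if choice == "X" then choice_score + 1
      else if choice == "Y" then choice_score + 2
      else if choice == "Z" then choice_score + 3
      else choice_score)
    0

-- ===== PORT B =====
-- scores = {'X': 1, 'Y': 2, 'Z': 3}
def pvScores : PySem.Dict String Int :=
  PySem.Dict.ofList [("X", 1), ("Y", 2), ("Z", 3)]

-- def total(lo, hi): divide-and-conquer over the index range [lo, hi).
-- choices[lo] is ported with pyGet?; the 'none' branch (IndexError) is unreachable
-- from the top-level call total(0, len(choices)) and defaults to 0 here.
def pvTotal (choices : List String) (lo hi : Int) : Int :=
  if _h0 : lo ≥ hi then 0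
  else if _h1 : hi - lo = 1 then
    match PySem.List.pyGet? choices lo with
    | some c => pvScores.getD c 0
    | none => 0
  else
    let mid := PySem.Int.floordiv (lo + hi) 2
    pvTotal choices lo mid + pvTotal choices mid hi
termination_by (hi - lo).toNat
decreasing_by
  · have := PySem.Int.floordiv_eq_iff_of_pos (a := lo + hi) (b := 2) (q := mid) (by omega)
    have hm : mid = PySem.Int.floordiv (lo + hi) 2 := rfl
    rw [hm, PySem.Int.floordiv_eq_ediv_of_pos (by omega)] at *
    omega
  · have hm : mid = PySem.Int.floordiv (lo + hi) 2 := rfl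
    rw [hm, PySem.Int.floordiv_eq_ediv_of_pos (by omega)] at *
    omega

def get_choice_score_alt (choices : List String) : Int :=
  pvTotal choices 0 (choices.length : Int)

-- ===== PRECONDITION & SPEC =====
def Spec_get_choice_score (choices : List String) (out : Int) : Prop := out = get_choice_score_alt choices
instance (choices : List String) (out : Int) : Decidable (Spec_get_choice_score choices out) := by unfold Spec_get_choice_score; infer_instance

-- ===== CLAIM (what is proved, stated in full; the proofs are below) =====
def Claim_equal_get_choice_score : Prop := ∀ (choices : List String), Dom_get_choice_score choices → Spec_get_choice_score choices (get_choice_score choices)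

-- ===== LEMMAS AND PROOFS =====

-- the score of one element, as B's table lookup
def pvScore (c : String) : Int := pvScores.getD c 0

theorem pvScore_eq (c : String) :
    pvScore c = (if c == "X" then 1 else if c == "Y" then 2 else if c == "Z" then 3 else 0) := by
  have hd : pvScores = PySem.Dict.mk [("X", 1), ("Y", 2), ("Z", 3)] := rfl
  by_cases hx : c = "X"
  · subst hx; decide
  · by_cases hy : c = "Y"
    · subst hy; decide
    · by_cases hz : c = "Z"
      · subst hz; decide
      · have h1 : ("X" == c) = false := beq_eq_false_iff_ne.mpr (Ne.symm hx)
        have h2 : ("Y" == c) = false := beq_eq_false_iff_ne.mpr (Ne.symm hy)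
        have h3 : ("Z" == c) = false := beq_eq_false_iff_ne.mpr (Ne.symm hz)
        simp [pvScore, PySem.Dict.getD, hd, h1, h2, h3,
              PySem.Dict.get?, hx, hy, hz]

-- A's fold started at acc = acc + sum of pvScore over the list
theorem pv_foldl_eq (l : List String) : ∀ acc : Int,
    l.foldl
      (fun choice_score choice =>
        if choice == "X" then choice_score + 1
        else if choice == "Y" then choice_score + 2
        else if choice == "Z" then choice_score + 3
        else choice_score)
      acc
    = acc + (l.map pvScore).sum := by
  induction l with
  | nil => intro acc; simp
  | cons x xs ih =>
    intro acc
    simp only [List.foldl_cons, ih, List.map_cons, List.sum_cons, pvScore_eq]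
    split_ifs <;> ring

-- B's recursion over [lo, hi) = sum of pvScore over the corresponding slice
theorem pvTotal_eq (choices : List String) : ∀ (n : Nat) (lo hi : Int),
    0 ≤ lo → hi ≤ (choices.length : Int) → (hi - lo).toNat = n →
    pvTotal choices lo hi = (((choices.drop lo.toNat).take (hi - lo).toNat).map pvScore).sum := by
  intro n
  induction n using Nat.strong_induction_on with
  | _ n ih =>
    intro lo hi hlo hhi hn
    rw [pvTotal]
    by_cases h0 : lo ≥ hi
    · simp [h0]
      have : (hi - lo).toNat = 0 := by omega
      simp [this]
    · simp only [h0, dite_false]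
      by_cases h1 : hi - lo = 1
      · simp only [h1, dite_true]
        have hlt : lo.toNat < choices.length := by omega
        have hget : PySem.List.pyGet? choices lo = some choices[lo.toNat] := by
          have h2 : lo < (choices.length : Int) := by omega
          simp [PySem.List.pyGet?, PySem.List.pyIdx?, hlo, h2]
        rw [hget]
        simp only [Int.toNat_one, List.take_one]
        have hhead : (choices.drop lo.toNat).head? = some choices[lo.toNat] := by
          rw [List.head?_drop]
          simp [hlt]
        simp [hhead, pvScore]
      · simp only [h1, dite_false]
        set mid := PySem.Int.floordiv (lo + hi) 2 with hm
        have hmideq : mid = (lo + hi) / 2 := by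
          rw [hm, PySem.Int.floordiv_eq_ediv_of_pos (by omega)]
        have hm1 : lo < mid := by omega
        have hm2 : mid < hi := by omega
        rw [ih (mid - lo).toNat (by omega) lo mid (by omega) (by omega) rfl,
            ih (hi - mid).toNat (by omega) mid hi (by omega) (by omega) rfl]
        have hsplit : (choices.drop lo.toNat).take (hi - lo).toNat
            = (choices.drop lo.toNat).take (mid - lo).toNat
              ++ (choices.drop mid.toNat).take (hi - mid).toNat := by
          have hadd : (hi - lo).toNat = (mid - lo).toNat + (hi - mid).toNat := by omega
          have hdd : lo.toNat + (mid - lo).toNat = mid.toNat := by omega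
          rw [hadd, List.take_add, List.drop_drop, hdd]
        rw [hsplit, List.map_append, List.sum_append]

-- ===== VERDICT (by name: the statement is the Claim_ definition above) =====
theorem get_choice_score_spec : Claim_equal_get_choice_score := by
  intro choices _
  unfold Spec_get_choice_score get_choice_score get_choice_score_alt
  rw [pv_foldl_eq, pvTotal_eq choices ((choices.length : Int) - 0).toNat 0 (choices.length : Int)
      le_rfl le_rfl rfl]
  simp
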